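-- pv_equiv track=rewrite | github.com/PalampurRockstar/Algorithm | src/main/python/algo/medium/slidingwindow/FirstNegativeNumberInKWindow.py | find
-- ===== SOURCE A (Python) =====
-- import collections
--
-- def find(arr, k):
--     DQ = collections.deque()
--     res = []
--     for i, v in enumerate(arr):
--         if v < 0: DQ.append(v)
--         if i + 1 >= k:
--             res.append(DQ[0] if DQ else 0)
--             if DQ and DQ[0] == arr[i - k + 1]: DQ.popleft()
--     return res
-- ===== SOURCE B (Python) =====
-- def find(arr, k):
--     out = []
--     for s in range(len(arr) - k + 1):
--         first = 0
--         for v in arr[s:s+k]: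
--             if v < 0:
--                 first = v
--                 break
--         out.append(first)
--     return out
-- ===== Notes on version B (the rewrite author's own statement) =====
-- stated objective: simpler
-- what changed: Replaces the deque-based sliding-window bookkeeping with a direct per-window scan: for each window start, scan the k-slice and take the first negative (0 if none); no deque, no popleft value-matching.
-- outside the precondition, e.g. on find([1, 2], 0): A returns [0, 0], B returns [0, 0, 0]; on find([-1], 0): A raises IndexError, B returns [0, 0]
import Mathlib
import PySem

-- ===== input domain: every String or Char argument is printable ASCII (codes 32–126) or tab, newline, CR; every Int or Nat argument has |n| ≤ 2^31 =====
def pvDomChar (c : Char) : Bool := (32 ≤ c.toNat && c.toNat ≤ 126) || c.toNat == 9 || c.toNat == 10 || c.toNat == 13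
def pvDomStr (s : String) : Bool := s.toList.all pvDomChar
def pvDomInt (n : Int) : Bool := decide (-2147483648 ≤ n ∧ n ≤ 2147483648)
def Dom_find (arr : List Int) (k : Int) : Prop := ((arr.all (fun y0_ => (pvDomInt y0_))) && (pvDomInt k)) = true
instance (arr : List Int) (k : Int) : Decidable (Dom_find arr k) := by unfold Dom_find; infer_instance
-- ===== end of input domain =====

-- B replaces A's deque bookkeeping with a plain per-window scan (simpler, no deque); same values on every k ≥ 1.

-- ===== PORT A =====
-- one loop iteration: dq is the deque (head = left end), p = (i, v) from enumerate
def findStep (arr : List Int) (k : Int) (st : List Int × List Int) (p : Int × Int) : List Int × List Int :=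
  let dq := if p.2 < 0 then st.1 ++ [p.2] else st.1
  if p.1 + 1 ≥ k then
    let res := st.2 ++ [dq.headD 0]      -- DQ[0] if DQ else 0
    -- 'if DQ and DQ[0] == arr[i-k+1]: DQ.popleft()'; arr[i-k+1] via pyGet? (none = IndexError, excluded by Pre_)
    let dq := if dq ≠ [] ∧ PySem.List.pyGet? arr (p.1 - k + 1) = some (dq.headD 0) then dq.tail else dq
    (dq, res)
  else (dq, st.2)

def find (arr : List Int) (k : Int) : List Int :=
  ((PySem.List.enumerate arr 0).foldl (findStep arr k) ([], [])).2

-- ===== PORT B =====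
-- inner 'for v in window: if v < 0: first = v; break' with first = 0 initially
def firstNeg : List Int → Int
  | [] => 0
  | v :: t => if v < 0 then v else firstNeg t

def find_alt (arr : List Int) (k : Int) : List Int :=
  (PySem.List.pyRange 0 ((arr.length : Int) - k + 1) 1).map
    (fun s => firstNeg (PySem.List.slice arr (some s) (some (s + k))))

-- ===== PRECONDITION & SPEC =====
-- Pre_ restricts to the natural domain of window sizes, k ≥ 1: for k ≤ 0 the Python A raises
-- IndexError on arr[i-k+1] whenever the deque is nonempty there, and where it happens to return
-- ([0]*len(arr)) that value is an accident of the guard 'i+1 >= k' being vacuously true.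
def Pre_find (arr : List Int) (k : Int) : Prop := 1 ≤ k
instance (arr : List Int) (k : Int) : Decidable (Pre_find arr k) := by unfold Pre_find; infer_instance
def pvWitness_find : List Int × Int := ([12, -1, -7, 8, -15, 30], 3)

def Spec_find (arr : List Int) (k : Int) (out : List Int) : Prop := out = find_alt arr k
instance (arr : List Int) (k : Int) (out : List Int) : Decidable (Spec_find arr k out) := by unfold Spec_find; infer_instance

-- ===== CLAIM (what is proved, stated in full; the proofs are below) =====
def Claim_equal_find : Prop := ∀ (arr : List Int) (k : Int), Dom_find arr k → Pre_find arr k → Spec_find arr k (find arr k)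

-- ===== LEMMAS AND PROOFS =====

-- the negatives of a segment, in order (A's deque contents)
def negs (l : List Int) : List Int := l.filter (fun v => decide (v < 0))

-- A's output value for the window ending at index i (0-based), window length kn
def wres (arr : List Int) (kn : Nat) (i : Nat) : Int :=
  (negs ((arr.take (i + 1)).drop (i + 1 - kn))).headD 0

-- A's outputs produced while processing indices j, j+1, …, n-1
def outs (arr : List Int) (kn j : Nat) : List Int :=
  (List.range' j (arr.length - j)).filterMap
    (fun i => if kn - 1 ≤ i then some (wres arr kn i) else none)

theorem firstNeg_eq_headD_negs (l : List Int) : firstNeg l = (negs l).headD 0 := by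
  induction l with
  | nil => rfl
  | cons v t ih =>
    by_cases h : v < 0 <;> (simp [firstNeg, negs, h] at *) <;> simpa [negs] using ih

theorem negs_append (l₁ l₂ : List Int) : negs (l₁ ++ l₂) = negs l₁ ++ negs l₂ := by
  simp [negs]

theorem mem_negs_neg {x : Int} {l : List Int} (h : x ∈ negs l) : x < 0 := by
  simp [negs] at h; exact h.2

-- one step of A's loop preserves the deque invariant and appends the window result
theorem step_eq (arr : List Int) (kn : Nat) (hk : 1 ≤ kn) (j : Nat) (hj : j < arr.length)
    (res : List Int) :
    findStep arr (kn : Int) (negs ((arr.take j).drop (j + 1 - kn)), res) ((j : Int), arr[j])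
      = (negs ((arr.take (j + 1)).drop (j + 2 - kn)),
         res ++ if kn - 1 ≤ j then [wres arr kn j] else []) := by
  have htake : arr.take (j + 1) = arr.take j ++ [arr[j]] := by
    rw [List.take_add_one, List.getElem?_eq_getElem hj]
    rfl
  have hlen : (arr.take j).length = j := by simp [List.length_take]; omega
  -- the deque after the conditional append
  have hdq : (if arr[j] < 0 then negs ((arr.take j).drop (j + 1 - kn)) ++ [arr[j]]
              else negs ((arr.take j).drop (j + 1 - kn)))
      = negs ((arr.take (j + 1)).drop (j + 1 - kn)) := by
    rw [htake, List.drop_append_of_le_length (by omega), negs_append]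
    by_cases h : arr[j] < 0 <;> simp [negs, h]
  by_cases hw : kn - 1 ≤ j
  · -- window complete: Int guard holds
    have hg : ((j : Int) + 1 ≥ (kn : Int)) := by omega
    have ha : (j : Int) - (kn : Int) + 1 = ((j + 1 - kn : Nat) : Int) := by omega
    set a : Nat := j + 1 - kn with hadef
    have haj : a ≤ j := by omega
    have hidx : PySem.List.pyGet? arr ((j : Int) - (kn : Int) + 1) = some arr[a] := by
      rw [ha]
      simpa using PySem.List.pyGet?_natCast (xs := arr) (i := a) |>.trans
        (List.getElem?_eq_getElem (by omega))
    have hseg : (arr.take (j + 1)).drop a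
        = arr[a] :: (arr.take (j + 1)).drop (a + 1) := by
      have h1 : a < (arr.take (j + 1)).length := by simp [List.length_take]; omega
      rw [List.drop_eq_getElem_cons h1]
      congr 1
      exact List.getElem_take
    have htgt : j + 2 - kn = a + 1 := by omega
    simp only [findStep, hdq, if_pos hg, hidx, hseg, htgt]
    have hw' : kn ≤ j + 1 := by omega
    by_cases hneg : arr[a] < 0
    · -- leaving element is negative: it is the head of the deque and is popped
      have hc : negs (arr[a] :: (arr.take (j + 1)).drop (a + 1))
          = arr[a] :: negs ((arr.take (j + 1)).drop (a + 1)) := by simp [negs, hneg]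
      rw [hc]
      simp only [wres, ← hadef, hseg, hc]
      simp [hw']
    · -- leaving element is non-negative: head (if any) is negative, no pop
      have hns : negs (arr[a] :: (arr.take (j + 1)).drop (a + 1))
          = negs ((arr.take (j + 1)).drop (a + 1)) := by simp [negs, hneg]
      rw [hns]
      rcases hE : negs ((arr.take (j + 1)).drop (a + 1)) with _ | ⟨h0, t0⟩
      · simp only [wres, ← hadef, hseg, hns, hE]
        simp [hw']
      · have h0neg : h0 < 0 := mem_negs_neg (l := (arr.take (j + 1)).drop (a + 1))
          (by rw [hE]; exact List.mem_cons_self)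
        have hne : ¬ (arr[a] = h0) := by omega
        simp only [wres, ← hadef, hseg, hns, hE]
        simp [hw', hne]
  · -- window not yet complete
    have hg : ¬ ((j : Int) + 1 ≥ (kn : Int)) := by omega
    have h1 : j + 1 - kn = 0 := by omega
    have h2 : j + 2 - kn = 0 := by omega
    rw [h1] at hdq
    simp only [findStep, if_neg hg, if_neg hw, h1, h2]
    rw [hdq]
    simp

-- the loop invariant, by induction on the remaining length
theorem loop_inv (arr : List Int) (kn : Nat) (hk : 1 ≤ kn) :
    ∀ (m j : Nat), j + m = arr.length → ∀ res : List Int,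
    ((PySem.List.enumerate (arr.drop j) (j : Int)).foldl (findStep arr (kn : Int))
        (negs ((arr.take j).drop (j + 1 - kn)), res)).2
      = res ++ outs arr kn j := by
  intro m
  induction m with
  | zero =>
    intro j hj res
    have : arr.drop j = [] := by rw [List.drop_eq_nil_iff]; omega
    simp [this, outs, hj.symm]
  | succ m ih =>
    intro j hj res
    have hjlt : j < arr.length := by omega
    have hdrop : arr.drop j = arr[j] :: arr.drop (j + 1) := List.drop_eq_getElem_cons hjlt
    rw [hdrop, PySem.List.enumerate_cons, List.foldl_cons, step_eq arr kn hk j hjlt res]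
    have hcast : ((j : Int) + 1) = ((j + 1 : Nat) : Int) := by push_cast; ring
    rw [hcast, ih (j + 1) (by omega)]
    have houts : outs arr kn j
        = (if kn - 1 ≤ j then [wres arr kn j] else []) ++ outs arr kn (j + 1) := by
      unfold outs
      have h1 : arr.length - j = (arr.length - (j + 1)) + 1 := by omega
      rw [h1, List.range'_succ, List.filterMap_cons]
      by_cases h : kn - 1 ≤ j <;> simp [h]
    rw [houts, List.append_assoc]

-- a filterMap of an 'emit from index m on' function over a range is a shifted map
theorem filterMap_ite_range {α : Type} (f : Nat → α) (m : Nat) :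
    ∀ n : Nat, (List.range n).filterMap (fun i => if m ≤ i then some (f i) else none)
      = (List.range (n - m)).map (fun s => f (s + m)) := by
  intro n
  induction n with
  | zero => simp
  | succ n ih =>
    rw [List.range_succ, List.filterMap_append, ih]
    by_cases h : m ≤ n
    · have h1 : n + 1 - m = (n - m) + 1 := by omega
      have h2 : n - m + m = n := by omega
      simp [h, h1, List.range_succ, h2]
    · have h1 : n + 1 - m = 0 := by omega
      have h2 : n - m = 0 := by omega
      simp [h, h1, h2]

-- B's window value equals A's, window ending at s + (kn-1)
theorem wres_eq_firstNeg (arr : List Int) (kn : Nat) (hk : 1 ≤ kn) (s : Nat) :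
    wres arr kn (s + (kn - 1)) = firstNeg ((arr.drop s).take kn) := by
  have h1 : s + (kn - 1) + 1 - kn = s := by omega
  have h2 : (arr.take (s + (kn - 1) + 1)).drop s = (arr.drop s).take kn := by
    rw [List.drop_take]
    congr 1
    omega
  rw [wres, h1, h2, firstNeg_eq_headD_negs]

-- ===== VERDICT (by name: the statement is the Claim_ definition above) =====
theorem find_eq (arr : List Int) (k : Int) (hk : 1 ≤ k) : find arr k = find_alt arr k := by
  set kn : Nat := k.toNat with hkn
  have hkcast : k = (kn : Int) := by omega
  have hk1 : 1 ≤ kn := by omega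
  have hinit : find arr k = outs arr kn 0 := by
    have h := loop_inv arr kn hk1 arr.length 0 (by simp) []
    simp [negs] at h
    rw [find, hkcast]
    simpa using h
  have houts : outs arr kn 0
      = (List.range (arr.length - (kn - 1))).map (fun s => wres arr kn (s + (kn - 1))) := by
    rw [outs, ← List.range_eq_range', ← filterMap_ite_range (fun i => wres arr kn i) (kn - 1)]
    simp
  have halt : find_alt arr k
      = (List.range (arr.length - (kn - 1))).map (fun s => firstNeg ((arr.drop s).take kn)) := by
    rw [find_alt, hkcast, PySem.List.pyRange_one, List.map_map]
    have hN : (((arr.length : Int) - (kn : Int) + 1) - 0).toNat = arr.length - (kn - 1) := by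
      omega
    rw [hN]
    refine List.map_congr_left ?_
    intro s hs
    have : (0 : Int) + (s : Int) = ((s : Nat) : Int) := by simp
    simp only [Function.comp, this]
    rw [PySem.List.slice_natCast_add]
  rw [hinit, houts, halt]
  refine List.map_congr_left ?_
  intro s hs
  exact wres_eq_firstNeg arr kn hk1 s

-- ===== VERDICT (by name: the statement is the Claim_ definition above) =====
theorem find_spec : Claim_equal_find := by
  intro arr k _ hpre
  unfold Spec_find
  exact find_eq arr k hpre
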